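-- pv_equiv track=rewrite | github.com/Vorkel/mn-opc-7025 | streamlit_app/feature_mapping.py | get_feature_category
-- ===== SOURCE A (Python) =====
-- def get_feature_category(feature_name):
--     """Retourne la catégorie d'une feature"""
--     categories = {
--         'demographic': ['CODE_GENDER', 'CNT_CHILDREN', 'DAYS_BIRTH', 'AGE_YEARS', 'AGE_GROUP'],
--         'financial': ['AMT_INCOME_TOTAL', 'AMT_CREDIT', 'AMT_ANNUITY', 'AMT_GOODS_PRICE', 'CREDIT_INCOME_RATIO', 'ANNUITY_INCOME_RATIO', 'CREDIT_GOODS_RATIO', 'ANNUITY_CREDIT_RATIO'],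
--         'employment': ['DAYS_EMPLOYED', 'OCCUPATION_TYPE', 'NAME_INCOME_TYPE', 'AGE_EMPLOYMENT_RATIO'],
--         'education': ['NAME_EDUCATION_TYPE'],
--         'family': ['NAME_FAMILY_STATUS', 'CNT_FAM_MEMBERS'],
--         'housing': ['NAME_HOUSING_TYPE', 'FLAG_OWN_REALTY', 'FLAG_OWN_CAR'],
--         'contact': ['FLAG_MOBIL', 'FLAG_EMP_PHONE', 'FLAG_WORK_PHONE', 'FLAG_CONT_MOBILE', 'FLAG_PHONE', 'FLAG_EMAIL', 'CONTACT_SCORE'],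
--         'region': ['REGION_POPULATION_RELATIVE', 'REGION_RATING_CLIENT', 'REGION_RATING_CLIENT_W_CITY', 'REG_CITY_NOT_LIVE_CITY', 'REG_CITY_NOT_WORK_CITY', 'REG_REGION_NOT_LIVE_REGION', 'REG_REGION_NOT_WORK_REGION'],
--         'organization': ['ORGANIZATION_TYPE'],
--         'external_scores': ['EXT_SOURCE_1', 'EXT_SOURCE_2', 'EXT_SOURCE_3', 'EXT_SOURCES_MEAN', 'EXT_SOURCES_MAX', 'EXT_SOURCES_MIN', 'EXT_SOURCES_STD', 'EXT_SOURCES_COUNT', 'AGE_EXT_SOURCES_INTERACTION'],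
--         'documents': [f'FLAG_DOCUMENT_{i}' for i in range(2, 22)],
--         'temporal': ['DAYS_REGISTRATION', 'DAYS_ID_PUBLISH', 'DAYS_LAST_PHONE_CHANGE'],
--         'credit_bureau': ['AMT_REQ_CREDIT_BUREAU_HOUR', 'AMT_REQ_CREDIT_BUREAU_DAY', 'AMT_REQ_CREDIT_BUREAU_WEEK', 'AMT_REQ_CREDIT_BUREAU_MON', 'AMT_REQ_CREDIT_BUREAU_QRT', 'AMT_REQ_CREDIT_BUREAU_YEAR'],
--         'payment': ['SK_DPD', 'SK_DPD_DEF'],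
--         'building': ['APARTMENTS_AVG', 'BASEMENTAREA_AVG', 'YEARS_BEGINEXPLUATATION_AVG', 'YEARS_BUILD_AVG', 'COMMONAREA_AVG', 'ELEVATORS_AVG', 'ENTRANCES_AVG', 'FLOORSMAX_AVG', 'FLOORSMIN_AVG', 'LANDAREA_AVG', 'LIVINGAPARTMENTS_AVG', 'LIVINGAREA_AVG', 'NONLIVINGAPARTMENTS_AVG', 'NONLIVINGAREA_AVG'],
--         'contract': ['NAME_CONTRACT_TYPE', 'NAME_TYPE_SUITE'],
--         'missing': ['AMT_ANNUITY_MISSING']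
--     }
--
--     for category, features in categories.items():
--         if feature_name in features:
--             return category
--
--     return 'other'
-- ===== SOURCE B (Python) =====
-- """Flat inverted index: one list of (feature, category) pairs, folded once into
-- a first-wins reverse dict; each call is a single lookup instead of a scan over
-- per-category feature lists."""
--
-- _PAIRS = [
--     ('CODE_GENDER', 'demographic'),
--     ('CNT_CHILDREN', 'demographic'),
--     ('DAYS_BIRTH', 'demographic'),
--     ('AGE_YEARS', 'demographic'),
--     ('AGE_GROUP', 'demographic'),
--     ('AMT_INCOME_TOTAL', 'financial'),
--     ('AMT_CREDIT', 'financial'),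
--     ('AMT_ANNUITY', 'financial'),
--     ('AMT_GOODS_PRICE', 'financial'),
--     ('CREDIT_INCOME_RATIO', 'financial'),
--     ('ANNUITY_INCOME_RATIO', 'financial'),
--     ('CREDIT_GOODS_RATIO', 'financial'),
--     ('ANNUITY_CREDIT_RATIO', 'financial'),
--     ('DAYS_EMPLOYED', 'employment'),
--     ('OCCUPATION_TYPE', 'employment'),
--     ('NAME_INCOME_TYPE', 'employment'),
--     ('AGE_EMPLOYMENT_RATIO', 'employment'),
--     ('NAME_EDUCATION_TYPE', 'education'),
--     ('NAME_FAMILY_STATUS', 'family'),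
--     ('CNT_FAM_MEMBERS', 'family'),
--     ('NAME_HOUSING_TYPE', 'housing'),
--     ('FLAG_OWN_REALTY', 'housing'),
--     ('FLAG_OWN_CAR', 'housing'),
--     ('FLAG_MOBIL', 'contact'),
--     ('FLAG_EMP_PHONE', 'contact'),
--     ('FLAG_WORK_PHONE', 'contact'),
--     ('FLAG_CONT_MOBILE', 'contact'),
--     ('FLAG_PHONE', 'contact'),
--     ('FLAG_EMAIL', 'contact'),
--     ('CONTACT_SCORE', 'contact'),
--     ('REGION_POPULATION_RELATIVE', 'region'),
--     ('REGION_RATING_CLIENT', 'region'),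
--     ('REGION_RATING_CLIENT_W_CITY', 'region'),
--     ('REG_CITY_NOT_LIVE_CITY', 'region'),
--     ('REG_CITY_NOT_WORK_CITY', 'region'),
--     ('REG_REGION_NOT_LIVE_REGION', 'region'),
--     ('REG_REGION_NOT_WORK_REGION', 'region'),
--     ('ORGANIZATION_TYPE', 'organization'),
--     ('EXT_SOURCE_1', 'external_scores'),
--     ('EXT_SOURCE_2', 'external_scores'),
--     ('EXT_SOURCE_3', 'external_scores'),
--     ('EXT_SOURCES_MEAN', 'external_scores'),
--     ('EXT_SOURCES_MAX', 'external_scores'),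
--     ('EXT_SOURCES_MIN', 'external_scores'),
--     ('EXT_SOURCES_STD', 'external_scores'),
--     ('EXT_SOURCES_COUNT', 'external_scores'),
--     ('AGE_EXT_SOURCES_INTERACTION', 'external_scores'),
--     ('FLAG_DOCUMENT_2', 'documents'),
--     ('FLAG_DOCUMENT_3', 'documents'),
--     ('FLAG_DOCUMENT_4', 'documents'),
--     ('FLAG_DOCUMENT_5', 'documents'),
--     ('FLAG_DOCUMENT_6', 'documents'),
--     ('FLAG_DOCUMENT_7', 'documents'),
--     ('FLAG_DOCUMENT_8', 'documents'),
--     ('FLAG_DOCUMENT_9', 'documents'),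
--     ('FLAG_DOCUMENT_10', 'documents'),
--     ('FLAG_DOCUMENT_11', 'documents'),
--     ('FLAG_DOCUMENT_12', 'documents'),
--     ('FLAG_DOCUMENT_13', 'documents'),
--     ('FLAG_DOCUMENT_14', 'documents'),
--     ('FLAG_DOCUMENT_15', 'documents'),
--     ('FLAG_DOCUMENT_16', 'documents'),
--     ('FLAG_DOCUMENT_17', 'documents'),
--     ('FLAG_DOCUMENT_18', 'documents'),
--     ('FLAG_DOCUMENT_19', 'documents'),
--     ('FLAG_DOCUMENT_20', 'documents'),
--     ('FLAG_DOCUMENT_21', 'documents'),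
--     ('DAYS_REGISTRATION', 'temporal'),
--     ('DAYS_ID_PUBLISH', 'temporal'),
--     ('DAYS_LAST_PHONE_CHANGE', 'temporal'),
--     ('AMT_REQ_CREDIT_BUREAU_HOUR', 'credit_bureau'),
--     ('AMT_REQ_CREDIT_BUREAU_DAY', 'credit_bureau'),
--     ('AMT_REQ_CREDIT_BUREAU_WEEK', 'credit_bureau'),
--     ('AMT_REQ_CREDIT_BUREAU_MON', 'credit_bureau'),
--     ('AMT_REQ_CREDIT_BUREAU_QRT', 'credit_bureau'),
--     ('AMT_REQ_CREDIT_BUREAU_YEAR', 'credit_bureau'),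
--     ('SK_DPD', 'payment'),
--     ('SK_DPD_DEF', 'payment'),
--     ('APARTMENTS_AVG', 'building'),
--     ('BASEMENTAREA_AVG', 'building'),
--     ('YEARS_BEGINEXPLUATATION_AVG', 'building'),
--     ('YEARS_BUILD_AVG', 'building'),
--     ('COMMONAREA_AVG', 'building'),
--     ('ELEVATORS_AVG', 'building'),
--     ('ENTRANCES_AVG', 'building'),
--     ('FLOORSMAX_AVG', 'building'),
--     ('FLOORSMIN_AVG', 'building'),
--     ('LANDAREA_AVG', 'building'),
--     ('LIVINGAPARTMENTS_AVG', 'building'),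
--     ('LIVINGAREA_AVG', 'building'),
--     ('NONLIVINGAPARTMENTS_AVG', 'building'),
--     ('NONLIVINGAREA_AVG', 'building'),
--     ('NAME_CONTRACT_TYPE', 'contract'),
--     ('NAME_TYPE_SUITE', 'contract'),
--     ('AMT_ANNUITY_MISSING', 'missing'),
-- ]
--
-- _REVERSE = {}
-- for _f, _c in _PAIRS:
--     _REVERSE.setdefault(_f, _c)
--
--
-- def get_feature_category(feature_name):
--     """Retourne la catégorie d'une feature"""
--     return _REVERSE.get(feature_name, 'other')
-- ===== Notes on version B (the rewrite author's own statement) =====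
-- stated objective: simpler
-- what changed: Replaces the per-call scan over nested per-category feature lists with a flat (feature, category) pair list folded once at import into a first-wins reverse dict; each call is a single lookup with a default.
import Mathlib
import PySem

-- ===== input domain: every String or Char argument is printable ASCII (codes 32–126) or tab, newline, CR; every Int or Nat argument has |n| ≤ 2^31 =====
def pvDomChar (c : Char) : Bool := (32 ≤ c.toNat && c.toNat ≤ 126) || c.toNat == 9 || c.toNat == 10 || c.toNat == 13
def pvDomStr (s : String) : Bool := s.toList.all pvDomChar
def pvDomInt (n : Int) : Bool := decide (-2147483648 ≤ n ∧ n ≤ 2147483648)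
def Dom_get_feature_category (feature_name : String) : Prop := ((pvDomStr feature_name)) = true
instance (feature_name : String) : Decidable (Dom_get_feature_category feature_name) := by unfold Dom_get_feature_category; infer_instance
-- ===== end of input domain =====

-- B flattens the category table into one (feature, category) pair list folded
-- once into a first-wins reverse dict; each call is a single lookup, no scan.


-- ===== PORT A =====
-- the literal 'categories' dict of A, in insertion order (the 'documents'
-- comprehension over range(2, 22) is written out as its literal value)
def pvCatsA : List (String × List String) := [
  ("demographic", ["CODE_GENDER", "CNT_CHILDREN", "DAYS_BIRTH", "AGE_YEARS", "AGE_GROUP"]),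
  ("financial", ["AMT_INCOME_TOTAL", "AMT_CREDIT", "AMT_ANNUITY", "AMT_GOODS_PRICE", "CREDIT_INCOME_RATIO", "ANNUITY_INCOME_RATIO", "CREDIT_GOODS_RATIO", "ANNUITY_CREDIT_RATIO"]),
  ("employment", ["DAYS_EMPLOYED", "OCCUPATION_TYPE", "NAME_INCOME_TYPE", "AGE_EMPLOYMENT_RATIO"]),
  ("education", ["NAME_EDUCATION_TYPE"]),
  ("family", ["NAME_FAMILY_STATUS", "CNT_FAM_MEMBERS"]),
  ("housing", ["NAME_HOUSING_TYPE", "FLAG_OWN_REALTY", "FLAG_OWN_CAR"]),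
  ("contact", ["FLAG_MOBIL", "FLAG_EMP_PHONE", "FLAG_WORK_PHONE", "FLAG_CONT_MOBILE", "FLAG_PHONE", "FLAG_EMAIL", "CONTACT_SCORE"]),
  ("region", ["REGION_POPULATION_RELATIVE", "REGION_RATING_CLIENT", "REGION_RATING_CLIENT_W_CITY", "REG_CITY_NOT_LIVE_CITY", "REG_CITY_NOT_WORK_CITY", "REG_REGION_NOT_LIVE_REGION", "REG_REGION_NOT_WORK_REGION"]),
  ("organization", ["ORGANIZATION_TYPE"]),
  ("external_scores", ["EXT_SOURCE_1", "EXT_SOURCE_2", "EXT_SOURCE_3", "EXT_SOURCES_MEAN", "EXT_SOURCES_MAX", "EXT_SOURCES_MIN", "EXT_SOURCES_STD", "EXT_SOURCES_COUNT", "AGE_EXT_SOURCES_INTERACTION"]),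
  ("documents", ["FLAG_DOCUMENT_2", "FLAG_DOCUMENT_3", "FLAG_DOCUMENT_4", "FLAG_DOCUMENT_5", "FLAG_DOCUMENT_6", "FLAG_DOCUMENT_7", "FLAG_DOCUMENT_8", "FLAG_DOCUMENT_9", "FLAG_DOCUMENT_10", "FLAG_DOCUMENT_11", "FLAG_DOCUMENT_12", "FLAG_DOCUMENT_13", "FLAG_DOCUMENT_14", "FLAG_DOCUMENT_15", "FLAG_DOCUMENT_16", "FLAG_DOCUMENT_17", "FLAG_DOCUMENT_18", "FLAG_DOCUMENT_19", "FLAG_DOCUMENT_20", "FLAG_DOCUMENT_21"]),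
  ("temporal", ["DAYS_REGISTRATION", "DAYS_ID_PUBLISH", "DAYS_LAST_PHONE_CHANGE"]),
  ("credit_bureau", ["AMT_REQ_CREDIT_BUREAU_HOUR", "AMT_REQ_CREDIT_BUREAU_DAY", "AMT_REQ_CREDIT_BUREAU_WEEK", "AMT_REQ_CREDIT_BUREAU_MON", "AMT_REQ_CREDIT_BUREAU_QRT", "AMT_REQ_CREDIT_BUREAU_YEAR"]),
  ("payment", ["SK_DPD", "SK_DPD_DEF"]),
  ("building", ["APARTMENTS_AVG", "BASEMENTAREA_AVG", "YEARS_BEGINEXPLUATATION_AVG", "YEARS_BUILD_AVG", "COMMONAREA_AVG", "ELEVATORS_AVG", "ENTRANCES_AVG", "FLOORSMAX_AVG", "FLOORSMIN_AVG", "LANDAREA_AVG", "LIVINGAPARTMENTS_AVG", "LIVINGAREA_AVG", "NONLIVINGAPARTMENTS_AVG", "NONLIVINGAREA_AVG"]),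
  ("contract", ["NAME_CONTRACT_TYPE", "NAME_TYPE_SUITE"]),
  ("missing", ["AMT_ANNUITY_MISSING"])
]

-- 'for category, features in categories.items(): if feature_name in features: return category' / 'return "other"'
def pvScanA (x : String) : List (String × List String) → String
  | [] => "other"
  | (c, fs) :: rest => if fs.contains x then c else pvScanA x rest

def get_feature_category (feature_name : String) : String :=
  pvScanA feature_name pvCatsA

-- ===== PORT B =====
-- the literal '_PAIRS' flat inverted list of Source B
def pvPairs : List (String × String) := [
  ("CODE_GENDER", "demographic"),
  ("CNT_CHILDREN", "demographic"),
  ("DAYS_BIRTH", "demographic"),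
  ("AGE_YEARS", "demographic"),
  ("AGE_GROUP", "demographic"),
  ("AMT_INCOME_TOTAL", "financial"),
  ("AMT_CREDIT", "financial"),
  ("AMT_ANNUITY", "financial"),
  ("AMT_GOODS_PRICE", "financial"),
  ("CREDIT_INCOME_RATIO", "financial"),
  ("ANNUITY_INCOME_RATIO", "financial"),
  ("CREDIT_GOODS_RATIO", "financial"),
  ("ANNUITY_CREDIT_RATIO", "financial"),
  ("DAYS_EMPLOYED", "employment"),
  ("OCCUPATION_TYPE", "employment"),
  ("NAME_INCOME_TYPE", "employment"),
  ("AGE_EMPLOYMENT_RATIO", "employment"),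
  ("NAME_EDUCATION_TYPE", "education"),
  ("NAME_FAMILY_STATUS", "family"),
  ("CNT_FAM_MEMBERS", "family"),
  ("NAME_HOUSING_TYPE", "housing"),
  ("FLAG_OWN_REALTY", "housing"),
  ("FLAG_OWN_CAR", "housing"),
  ("FLAG_MOBIL", "contact"),
  ("FLAG_EMP_PHONE", "contact"),
  ("FLAG_WORK_PHONE", "contact"),
  ("FLAG_CONT_MOBILE", "contact"),
  ("FLAG_PHONE", "contact"),
  ("FLAG_EMAIL", "contact"),
  ("CONTACT_SCORE", "contact"),
  ("REGION_POPULATION_RELATIVE", "region"),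
  ("REGION_RATING_CLIENT", "region"),
  ("REGION_RATING_CLIENT_W_CITY", "region"),
  ("REG_CITY_NOT_LIVE_CITY", "region"),
  ("REG_CITY_NOT_WORK_CITY", "region"),
  ("REG_REGION_NOT_LIVE_REGION", "region"),
  ("REG_REGION_NOT_WORK_REGION", "region"),
  ("ORGANIZATION_TYPE", "organization"),
  ("EXT_SOURCE_1", "external_scores"),
  ("EXT_SOURCE_2", "external_scores"),
  ("EXT_SOURCE_3", "external_scores"),
  ("EXT_SOURCES_MEAN", "external_scores"),
  ("EXT_SOURCES_MAX", "external_scores"),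
  ("EXT_SOURCES_MIN", "external_scores"),
  ("EXT_SOURCES_STD", "external_scores"),
  ("EXT_SOURCES_COUNT", "external_scores"),
  ("AGE_EXT_SOURCES_INTERACTION", "external_scores"),
  ("FLAG_DOCUMENT_2", "documents"),
  ("FLAG_DOCUMENT_3", "documents"),
  ("FLAG_DOCUMENT_4", "documents"),
  ("FLAG_DOCUMENT_5", "documents"),
  ("FLAG_DOCUMENT_6", "documents"),
  ("FLAG_DOCUMENT_7", "documents"),
  ("FLAG_DOCUMENT_8", "documents"),
  ("FLAG_DOCUMENT_9", "documents"),
  ("FLAG_DOCUMENT_10", "documents"),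
  ("FLAG_DOCUMENT_11", "documents"),
  ("FLAG_DOCUMENT_12", "documents"),
  ("FLAG_DOCUMENT_13", "documents"),
  ("FLAG_DOCUMENT_14", "documents"),
  ("FLAG_DOCUMENT_15", "documents"),
  ("FLAG_DOCUMENT_16", "documents"),
  ("FLAG_DOCUMENT_17", "documents"),
  ("FLAG_DOCUMENT_18", "documents"),
  ("FLAG_DOCUMENT_19", "documents"),
  ("FLAG_DOCUMENT_20", "documents"),
  ("FLAG_DOCUMENT_21", "documents"),
  ("DAYS_REGISTRATION", "temporal"),
  ("DAYS_ID_PUBLISH", "temporal"),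
  ("DAYS_LAST_PHONE_CHANGE", "temporal"),
  ("AMT_REQ_CREDIT_BUREAU_HOUR", "credit_bureau"),
  ("AMT_REQ_CREDIT_BUREAU_DAY", "credit_bureau"),
  ("AMT_REQ_CREDIT_BUREAU_WEEK", "credit_bureau"),
  ("AMT_REQ_CREDIT_BUREAU_MON", "credit_bureau"),
  ("AMT_REQ_CREDIT_BUREAU_QRT", "credit_bureau"),
  ("AMT_REQ_CREDIT_BUREAU_YEAR", "credit_bureau"),
  ("SK_DPD", "payment"),
  ("SK_DPD_DEF", "payment"),
  ("APARTMENTS_AVG", "building"),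
  ("BASEMENTAREA_AVG", "building"),
  ("YEARS_BEGINEXPLUATATION_AVG", "building"),
  ("YEARS_BUILD_AVG", "building"),
  ("COMMONAREA_AVG", "building"),
  ("ELEVATORS_AVG", "building"),
  ("ENTRANCES_AVG", "building"),
  ("FLOORSMAX_AVG", "building"),
  ("FLOORSMIN_AVG", "building"),
  ("LANDAREA_AVG", "building"),
  ("LIVINGAPARTMENTS_AVG", "building"),
  ("LIVINGAREA_AVG", "building"),
  ("NONLIVINGAPARTMENTS_AVG", "building"),
  ("NONLIVINGAREA_AVG", "building"),
  ("NAME_CONTRACT_TYPE", "contract"),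
  ("NAME_TYPE_SUITE", "contract"),
  ("AMT_ANNUITY_MISSING", "missing")
]

-- '_REVERSE = {}; for _f, _c in _PAIRS: _REVERSE.setdefault(_f, _c)'
def pvReverseB : PySem.Dict String String :=
  pvPairs.foldl (fun d p => d.setdefault p.1 p.2) PySem.Dict.empty

-- 'return _REVERSE.get(feature_name, "other")'
def get_feature_category_alt (feature_name : String) : String :=
  pvReverseB.getD feature_name "other"

-- ===== PRECONDITION & SPEC =====
def Spec_get_feature_category (feature_name : String) (out : String) : Prop := out = get_feature_category_alt feature_name
instance (feature_name : String) (out : String) : Decidable (Spec_get_feature_category feature_name out) := by unfold Spec_get_feature_category; infer_instance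

-- ===== CLAIM =====
def Claim_equal_get_feature_category : Prop := ∀ (feature_name : String), Dom_get_feature_category feature_name → Spec_get_feature_category feature_name (get_feature_category feature_name)

-- ===== LEMMAS AND PROOFS =====
-- first category (if any) whose feature list contains x
def pvScanOpt (x : String) : List (String × List String) → Option String
  | [] => none
  | (c, fs) :: rest => if fs.contains x then some c else pvScanOpt x rest

-- first pair (if any) whose key is x
def pvLookup (x : String) : List (String × String) → Option String
  | [] => none
  | (f, c) :: rest => if f = x then some c else pvLookup x rest

theorem pvScanA_eq (x : String) (cats : List (String × List String)) :
    pvScanA x cats = (pvScanOpt x cats).getD "other" := by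
  induction cats with
  | nil => rfl
  | cons p rest ih =>
    obtain ⟨c, fs⟩ := p
    simp only [pvScanA, pvScanOpt]
    split <;> simp [ih]

-- the setdefault loop over flat pairs realises first-match lookup
theorem pvFold_get? (ps : List (String × String)) (d : PySem.Dict String String) (x : String) :
    (ps.foldl (fun d p => d.setdefault p.1 p.2) d).get? x
      = ((d.get? x).or (pvLookup x ps)) := by
  induction ps generalizing d with
  | nil => simp [pvLookup]
  | cons p rest ih =>
    obtain ⟨f, c⟩ := p
    simp only [List.foldl_cons, ih, pvLookup]
    by_cases hx : f = x
    · subst hx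
      rw [PySem.Dict.get?_setdefault_self]
      cases h : d.get? f <;> simp
    · rw [PySem.Dict.get?_setdefault_of_ne (k' := x) (hne := fun h => hx h.symm)]
      simp [hx]

-- lookup in the flattened pair list = the grouped first-category scan
theorem pvLookup_inner (x c : String) (fs : List String) (rest : List (String × String)) :
    pvLookup x (fs.map (fun f => (f, c)) ++ rest)
      = if fs.contains x then some c else pvLookup x rest := by
  induction fs with
  | nil => simp
  | cons f fs ih =>
    simp only [List.map_cons, List.cons_append, pvLookup, ih, List.contains_cons]
    by_cases hx : f = x
    · simp [hx]
    · have hx' : ¬ x = f := fun h => hx h.symm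
      simp [hx, hx']

theorem pvLookup_flat (x : String) (cats : List (String × List String)) :
    pvLookup x (cats.flatMap (fun cf => cf.2.map (fun f => (f, cf.1))))
      = pvScanOpt x cats := by
  induction cats with
  | nil => rfl
  | cons p rest ih =>
    obtain ⟨c, fs⟩ := p
    simp only [List.flatMap_cons, pvScanOpt, pvLookup_inner, ih]

-- B's literal flat pair list IS A's table flattened (checked by evaluation)
theorem pvPairs_eq :
    pvPairs = pvCatsA.flatMap (fun cf => cf.2.map (fun f => (f, cf.1))) := by rfl

-- ===== VERDICT =====
theorem get_feature_category_spec : Claim_equal_get_feature_category := by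
  intro x _
  unfold Spec_get_feature_category get_feature_category get_feature_category_alt pvReverseB
  rw [PySem.Dict.getD_eq_get?_getD, pvFold_get?, pvPairs_eq, pvLookup_flat, pvScanA_eq]
  simp
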